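-- pv_equiv track=rewrite | github.com/RPINerd/fqTooling | simples.py | contains_n_consecutive
-- ===== SOURCE A (Python) =====
-- def contains_n_consecutive(n, lst, sort=False):
--     """
--     Check if an integer list contains n or more consecutive numbers
--
--     e.g. n = 3, lst = [1, 2, 3, 6, 10]
--         returns True because list contains 3 consecutive numbers (1,2,3)
--         n = 4, lst = [1, 4, 5, 6, 10]
--         returns False because the longest sequence of consescutive numbers is only 3  - (4,5,6)
--
--     :param int: n: Number of consecutive numbers to check for
--     :param list: lst: List of integers to check
--     :param bool: sort: Sort the list before checking
--     :rtype: bool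
--     """
--
--     if sort:
--         lst = sorted(lst)
--
--     prev = lst[0]
--     count = 1
--     for idx, e in enumerate(lst):
--         if e - prev == 1:
--             count += 1
--         else:
--             count = 1
--         if count == n:
--             return True
--         prev = e
--
--     return False
-- ===== SOURCE B (Python) =====
-- def contains_n_consecutive(n, lst, sort=False):
--     """Check if an integer list contains n or more consecutive numbers.
--
--     Suffix-window strategy: for each start position i, try to walk a run of
--     n consecutive integers beginning at lst[i]; succeed as soon as one start
--     works.  (A instead keeps a single running counter over one pass.)
--     """
--     if sort:
--         lst = sorted(lst)
--     if n < 1: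
--         return False
--     for i in range(len(lst)):
--         need = n - 1          # +1 steps still required after lst[i]
--         prev = lst[i]
--         j = i + 1
--         while need > 0 and j < len(lst) and lst[j] - prev == 1:
--             prev = lst[j]
--             need -= 1
--             j += 1
--         if need == 0:
--             return True
--     return False
-- ===== Notes on version B (the rewrite author's own statement) =====
-- stated objective: alternative
-- what changed: Replaces A's single-pass running counter (reset on non-+1 steps, early return when the counter hits n) by a suffix-window search: for each start index, walk forward checking for a run of n consecutive integers; an explicit n<1 guard replaces A's counter never reaching a non-positive n.
import Mathlib
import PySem

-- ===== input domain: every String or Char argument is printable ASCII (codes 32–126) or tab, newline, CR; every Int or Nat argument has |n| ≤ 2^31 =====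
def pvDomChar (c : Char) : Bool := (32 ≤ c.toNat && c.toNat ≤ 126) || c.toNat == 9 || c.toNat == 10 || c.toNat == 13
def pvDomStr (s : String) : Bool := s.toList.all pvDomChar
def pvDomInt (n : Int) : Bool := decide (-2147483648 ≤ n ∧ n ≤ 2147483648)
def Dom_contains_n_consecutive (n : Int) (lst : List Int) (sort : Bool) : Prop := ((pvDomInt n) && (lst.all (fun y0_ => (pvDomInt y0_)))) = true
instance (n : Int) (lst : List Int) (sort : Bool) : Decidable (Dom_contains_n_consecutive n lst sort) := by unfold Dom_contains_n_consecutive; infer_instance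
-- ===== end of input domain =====

-- B is an alternative decomposition (suffix-window search instead of A's running counter); return-value equivalence only.

-- ===== PORT A =====
-- the for-loop over enumerate(lst) with state (prev, count) and early return
def aLoop (n : Int) (lst : List Int) (prev count : Int) : Bool :=
  match lst with
  | [] => false
  | e :: rest =>
    let count := if e - prev = 1 then count + 1 else 1
    if count = n then true else aLoop n rest e count

def contains_n_consecutive (n : Int) (lst : List Int) (sort : Bool) : Bool :=
  let lst := if sort then PySem.List.sorted lst (fun x => x) false else lst
  match PySem.List.pyGet? lst 0 with   -- lst[0]; none = IndexError, excluded by Pre_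
  | none => false
  | some prev => aLoop n lst prev 1

-- ===== PORT B =====
-- the while-loop: state (prev, need), advancing j = recursing into the suffix
def bExtends (prev : Int) (xs : List Int) (need : Int) : Bool :=
  match xs with
  | [] => decide (need = 0)
  | x :: rest =>
    if 0 < need ∧ x - prev = 1 then bExtends x rest (need - 1)
    else decide (need = 0)

-- the for-loop over start positions i, lst[i] = head of the suffix, early return
def bAnywhere (n : Int) (xs : List Int) : Bool :=
  match xs with
  | [] => false
  | x :: rest => if bExtends x rest (n - 1) then true else bAnywhere n rest

def contains_n_consecutive_alt (n : Int) (lst : List Int) (sort : Bool) : Bool :=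
  let lst := if sort then PySem.List.sorted lst (fun x => x) false else lst
  if n < 1 then false
  else bAnywhere n lst

-- ===== PRECONDITION & SPEC =====
-- Pre_ excludes only the empty list, on which A raises IndexError at lst[0].
def Pre_contains_n_consecutive (n : Int) (lst : List Int) (sort : Bool) : Prop := lst ≠ []
instance (n : Int) (lst : List Int) (sort : Bool) : Decidable (Pre_contains_n_consecutive n lst sort) := by unfold Pre_contains_n_consecutive; infer_instance
def pvWitness_contains_n_consecutive : Int × List Int × Bool := (3, [1, 2, 3, 6, 10], false)

def Spec_contains_n_consecutive (n : Int) (lst : List Int) (sort : Bool) (out : Bool) : Prop := out = contains_n_consecutive_alt n lst sort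
instance (n : Int) (lst : List Int) (sort : Bool) (out : Bool) : Decidable (Spec_contains_n_consecutive n lst sort out) := by unfold Spec_contains_n_consecutive; infer_instance

-- ===== CLAIM (what is proved, stated in full; the proofs are below) =====
def Claim_equal_contains_n_consecutive : Prop := ∀ (n : Int) (lst : List Int) (sort : Bool), Dom_contains_n_consecutive n lst sort → Pre_contains_n_consecutive n lst sort → Spec_contains_n_consecutive n lst sort (contains_n_consecutive n lst sort)

-- ===== LEMMAS AND PROOFS =====

theorem bExtends_zero (prev : Int) (xs : List Int) : bExtends prev xs 0 = true := by
  cases xs with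
  | nil => simp [bExtends]
  | cons x rest => simp [bExtends]

theorem bExtends_mono (xs : List Int) : ∀ (prev m m' : Int), 0 ≤ m' → m' ≤ m →
    bExtends prev xs m = true → bExtends prev xs m' = true := by
  induction xs with
  | nil =>
    intro prev m m' h0 hle h
    simp [bExtends] at h ⊢; omega
  | cons x rest ih =>
    intro prev m m' h0 hle h
    by_cases hm' : 0 < m'
    · have hm : 0 < m := by omega
      simp only [bExtends] at h ⊢
      by_cases hd : x - prev = 1
      · have hc1 : 0 < m ∧ x - prev = 1 := ⟨hm, hd⟩
        have hc2 : 0 < m' ∧ x - prev = 1 := ⟨hm', hd⟩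
        rw [if_pos hc1] at h
        rw [if_pos hc2]
        exact ih x (m - 1) (m' - 1) (by omega) (by omega) h
      · have hc : ¬ (0 < m ∧ x - prev = 1) := fun hc => hd hc.2
        rw [if_neg hc] at h
        simp at h; omega
    · have : m' = 0 := by omega
      subst this
      exact bExtends_zero prev (x :: rest)

theorem aLoop_nonpos (n : Int) (hn : n ≤ 0) (lst : List Int) :
    ∀ (prev count : Int), 1 ≤ count → aLoop n lst prev count = false := by
  induction lst with
  | nil => intro prev count _; simp [aLoop]
  | cons e rest ih =>
    intro prev count hc
    simp only [aLoop]
    by_cases hd : e - prev = 1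
    · rw [if_pos hd, if_neg (by omega)]
      exact ih e (count + 1) (by omega)
    · rw [if_neg hd, if_neg (by omega)]
      exact ih e 1 (by omega)

theorem aLoop_eq (n : Int) (lst : List Int) :
    ∀ (prev count : Int), 1 ≤ count → count < n →
    aLoop n lst prev count = (bExtends prev lst (n - count) || bAnywhere n lst) := by
  induction lst with
  | nil =>
    intro prev count h1 h2
    simp [aLoop, bAnywhere, bExtends]; omega
  | cons e rest ih =>
    intro prev count h1 h2
    simp only [aLoop, bAnywhere, bExtends]
    by_cases hd : e - prev = 1
    · have hcond : 0 < n - count ∧ e - prev = 1 := ⟨by omega, hd⟩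
      rw [if_pos hd, if_pos hcond]
      by_cases heq : count + 1 = n
      · rw [if_pos heq]
        have h0 : n - count - 1 = 0 := by omega
        rw [h0, bExtends_zero]
        simp
      · rw [if_neg heq]
        rw [ih e (count + 1) (by omega) (by omega)]
        have habs : bExtends e rest (n - 1) = true → bExtends e rest (n - (count + 1)) = true :=
          bExtends_mono rest e (n - 1) (n - (count + 1)) (by omega) (by omega)
        have harr : n - count - 1 = n - (count + 1) := by omega
        rw [harr]
        cases hx : bExtends e rest (n - (count + 1)) with
        | true => simp
        | false =>
          cases hy : bExtends e rest (n - 1) with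
          | true => rw [habs hy] at hx; exact absurd hx (by simp)
          | false => simp
    · rw [if_neg hd]
      have hno : ¬ (0 < n - count ∧ e - prev = 1) := fun hc => hd hc.2
      rw [if_neg hno, decide_eq_false (by omega : ¬ (n - count = 0)), Bool.false_or]
      rw [if_neg (by omega : ¬ (1 : Int) = n)]
      rw [ih e 1 (by omega) (by omega)]
      cases hx : bExtends e rest (n - 1) <;> simp

-- ===== VERDICT (by name: the statement is the Claim_ definition above) =====
theorem contains_n_consecutive_spec : Claim_equal_contains_n_consecutive := by
  intro n lst sort _ hpre
  unfold Spec_contains_n_consecutive contains_n_consecutive contains_n_consecutive_alt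
  simp only []
  set L : List Int := if sort then PySem.List.sorted lst (fun x => x) false else lst with hL
  have hLne : L ≠ [] := by
    rw [hL]
    by_cases hs : sort
    · simp only [if_pos hs]
      intro h
      have := PySem.List.sorted_perm lst (fun x : Int => x) false
      rw [h] at this
      exact hpre (List.Perm.nil_eq this).symm
    · simpa [if_neg hs] using hpre
  cases hc : L with
  | nil => exact absurd hc hLne
  | cons h t =>
    rw [PySem.List.pyGet?_zero_cons]
    simp only [aLoop, bAnywhere]
    rw [if_neg (by omega : ¬ (h - h = 1))]
    by_cases hn1 : (1 : Int) = n
    · rw [if_pos hn1, if_neg (by omega : ¬ n < 1)]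
      have : n - 1 = 0 := by omega
      rw [this, bExtends_zero]; simp
    · rw [if_neg hn1]
      by_cases hneg : n < 1
      · rw [if_pos hneg]
        exact aLoop_nonpos n (by omega) t h 1 (by omega)
      · rw [if_neg hneg]
        rw [aLoop_eq n t h 1 (by omega) (by omega)]
        cases hx : bExtends h t (n - 1) with
        | true => simp
        | false => simp
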